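-- pv_equiv track=rewrite | github.com/1797127235/CareerPlanningAgent | backend/services/report/data.py | _skill_in_set
-- ===== SOURCE A (Python) =====
-- def _norm_skill(s: str) -> str:
--     return s.lower().strip().replace(" ", "").replace("-", "").replace("_", "")
--
-- def _skill_in_set(skill_name: str, skill_set: set[str]) -> bool:
--     """Fuzzy-check whether skill_name appears in a given set (e.g. practiced skills from projects)."""
--     if not skill_set:
--         return False
--     name_norm = _norm_skill(skill_name)
--     if not name_norm:
--         return False
--     for s in skill_set:
--         s_norm = _norm_skill(s)
--         if name_norm == s_norm:
--             return True
--         if len(name_norm) > 2 and len(s_norm) > 2 and (name_norm in s_norm or s_norm in name_norm):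
--             return True
--     return False
-- ===== SOURCE B (Python) =====
-- def _norm_skill(s: str) -> str:
--     return s.lower().strip().replace(" ", "").replace("-", "").replace("_", "")
--
-- def _skill_in_set(skill_name: str, skill_set: set) -> bool:
--     if not skill_set:
--         return False
--     name_norm = _norm_skill(skill_name)
--     if not name_norm:
--         return False
--     norms = {_norm_skill(s) for s in skill_set}
--     if name_norm in norms:
--         return True
--     n = len(name_norm)
--     if n <= 2:
--         return False
--     # dictionary-matching direction: locate set members inside the name by
--     # enumerating substrings of length >= 3 and hashed lookups
--     for i in range(n):
--         for j in range(i + 3, n + 1):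
--             if name_norm[i:j] in norms:
--                 return True
--     # remaining direction: the name inside a longer set member
--     for s_norm in norms:
--         if len(s_norm) > 2 and name_norm in s_norm:
--             return True
--     return False
-- ===== Notes on version B (the rewrite author's own statement) =====
-- stated objective: alternative
-- what changed: B answers the exact case by a hashed lookup in a normalized set built once, finds 'a set member inside the name' by dictionary-matching (enumerating the name's substrings of length >= 3 and looking each up in the set) instead of calling containment per element, and only then runs one remaining one-directional pass for 'name inside a longer member'.
import Mathlib
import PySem

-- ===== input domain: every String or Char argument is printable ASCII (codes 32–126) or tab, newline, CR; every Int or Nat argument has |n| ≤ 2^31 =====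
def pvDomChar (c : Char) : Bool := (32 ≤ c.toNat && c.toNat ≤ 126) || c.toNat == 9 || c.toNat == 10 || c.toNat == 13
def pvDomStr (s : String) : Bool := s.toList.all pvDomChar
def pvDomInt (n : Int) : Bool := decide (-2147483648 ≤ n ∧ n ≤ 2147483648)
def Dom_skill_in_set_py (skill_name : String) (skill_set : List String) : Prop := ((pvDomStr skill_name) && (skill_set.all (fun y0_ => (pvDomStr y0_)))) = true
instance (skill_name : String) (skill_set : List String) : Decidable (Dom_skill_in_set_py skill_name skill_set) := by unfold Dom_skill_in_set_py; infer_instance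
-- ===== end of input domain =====

-- B replaces A's per-element mutual-substring loop by a different algorithm: hashed exact lookup, then dictionary-matching (enumerate the name's substrings of length ≥ 3 and look each up in the normalized set), then one remaining one-directional pass; same results.

-- ===== PORT A =====
def norm_skill_py (s : String) : String :=
  PySem.Str.replace (PySem.Str.replace (PySem.Str.replace (PySem.Str.strip (PySem.Str.lower s)) " " "") "-" "") "_" ""

def skill_loop_py (name_norm : String) : List String → Bool
  | [] => false
  | s :: rest =>
    let s_norm := norm_skill_py s
    if name_norm == s_norm then true
    else if decide (2 < PySem.Str.len name_norm) && decide (2 < PySem.Str.len s_norm)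
            && (PySem.Str.isIn name_norm s_norm || PySem.Str.isIn s_norm name_norm) then true
    else skill_loop_py name_norm rest

def skill_in_set_py (skill_name : String) (skill_set : List String) : Bool :=
  if skill_set == [] then false
  else
    let name_norm := norm_skill_py skill_name
    if name_norm == "" then false
    else skill_loop_py name_norm skill_set

-- ===== PORT B =====
def skill_in_set_py_alt (skill_name : String) (skill_set : List String) : Bool :=
  if skill_set == [] then false
  else
    let name_norm := norm_skill_py skill_name
    if name_norm == "" then false
    else
      let norms : PySem.Set String := PySem.Set.ofList (skill_set.map norm_skill_py)
      if PySem.Set.contains norms name_norm then true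
      else
        let n : Int := PySem.Str.len name_norm
        if n ≤ 2 then false
        else if (PySem.List.pyRange 0 n 1).any (fun i =>
              (PySem.List.pyRange (i + 3) (n + 1) 1).any (fun j =>
                PySem.Set.contains norms (PySem.Str.slice name_norm (some i) (some j)))) then true
        else norms.any (fun s_norm =>
              decide (2 < PySem.Str.len s_norm) && PySem.Str.isIn name_norm s_norm)

-- ===== PRECONDITION & SPEC =====
def Spec_skill_in_set_py (skill_name : String) (skill_set : List String) (out : Bool) : Prop := out = skill_in_set_py_alt skill_name skill_set
instance (skill_name : String) (skill_set : List String) (out : Bool) : Decidable (Spec_skill_in_set_py skill_name skill_set out) := by unfold Spec_skill_in_set_py; infer_instance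

-- ===== CLAIM (what is proved, stated in full; the proofs are below) =====
def Claim_equal_skill_in_set_py : Prop := ∀ (skill_name : String) (skill_set : List String), Dom_skill_in_set_py skill_name skill_set → Spec_skill_in_set_py skill_name skill_set (skill_in_set_py skill_name skill_set)

-- ===== LEMMAS AND PROOFS =====

theorem skill_loop_eq_any (n : String) (l : List String) :
    skill_loop_py n l = l.any (fun s =>
      n == norm_skill_py s ||
      (decide (2 < PySem.Str.len n) && decide (2 < PySem.Str.len (norm_skill_py s))
        && (PySem.Str.isIn n (norm_skill_py s) || PySem.Str.isIn (norm_skill_py s) n))) := by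
  induction l with
  | nil => rfl
  | cons s rest ih =>
    simp only [skill_loop_py, List.any_cons, ih]
    split_ifs with h1 h2
    · rw [h1]; rfl
    · rw [Bool.not_eq_true] at h1; rw [h1, h2]; rfl
    · rw [Bool.not_eq_true] at h1 h2; rw [h1, h2]; rfl

theorem contains_ofList_iff (l : List String) (x : String) :
    PySem.Set.contains (PySem.Set.ofList l) x = true ↔ x ∈ l := by
  rw [PySem.Set.contains_iff]; exact PySem.Set.mem_ofList l x

theorem any_ofList {p : String → Bool} (l : List String) :
    (PySem.Set.ofList l).any p = l.any p := by
  rw [Bool.eq_iff_iff]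
  simp only [List.any_eq_true]
  constructor
  · rintro ⟨x, hx, hp⟩; exact ⟨x, (PySem.Set.mem_ofList l x).1 hx, hp⟩
  · rintro ⟨x, hx, hp⟩; exact ⟨x, (PySem.Set.mem_ofList l x).2 hx, hp⟩

-- a member of the set occurs inside the name iff some substring of the name of length ≥ 3 is in the set
theorem sub_scan_iff (name : String) (norms : List String) :
    ((PySem.List.pyRange 0 (PySem.Str.len name) 1).any (fun i =>
        (PySem.List.pyRange (i + 3) (PySem.Str.len name + 1) 1).any (fun j =>
          PySem.Set.contains (PySem.Set.ofList norms) (PySem.Str.slice name (some i) (some j)))) = true)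
      ↔ ∃ t ∈ norms, 3 ≤ t.toList.length ∧ t.toList <:+: name.toList := by
  simp only [List.any_eq_true, PySem.List.mem_pyRange_one]
  constructor
  · rintro ⟨i, ⟨hi0, hin⟩, j, ⟨hij, hjn⟩, hc⟩
    refine ⟨PySem.Str.slice name (some i) (some j),
      (PySem.Set.mem_ofList _ _).1 ((PySem.Set.contains_iff _ _).1 hc), ?_, ?_⟩
    · rw [PySem.Str.toList_slice]
      have hj0 : (0:Int) ≤ j := by omega
      have hL : PySem.Str.len name = (name.toList.length : Int) := PySem.Str.len_eq name
      rw [hL] at hin hjn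
      rw [show PySem.Chars.slice name.toList (some i) (some j)
            = List.take (j.toNat - i.toNat) (List.drop i.toNat name.toList) from
          PySem.List.slice_of_nonneg _ hi0 hj0 (by omega) (by omega)]
      rw [List.length_take, List.length_drop]
      omega
    · rw [PySem.Str.toList_slice]
      have hj0 : (0:Int) ≤ j := by omega
      have hL : PySem.Str.len name = (name.toList.length : Int) := PySem.Str.len_eq name
      rw [hL] at hin hjn
      rw [show PySem.Chars.slice name.toList (some i) (some j)
            = List.take (j.toNat - i.toNat) (List.drop i.toNat name.toList) from
          PySem.List.slice_of_nonneg _ hi0 hj0 (by omega) (by omega)]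
      exact ((List.take_prefix _ _).isInfix).trans ((List.drop_suffix _ _).isInfix)
  · rintro ⟨t, ht, h3, ⟨s, u, hsu⟩⟩
    have hL : PySem.Str.len name = (name.toList.length : Int) := PySem.Str.len_eq name
    have hlen : s.length + t.toList.length + u.length = name.toList.length := by
      rw [← hsu]; simp [List.length_append]; omega
    refine ⟨(s.length : Int), ⟨by positivity, by rw [hL]; exact_mod_cast (by omega)⟩,
      ((s.length + t.toList.length : Nat) : Int), ⟨by push_cast; omega, by rw [hL]; push_cast; omega⟩, ?_⟩
    rw [PySem.Set.contains_iff, PySem.Set.mem_ofList]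
    have : PySem.Str.slice name (some (s.length : Int)) (some ((s.length + t.toList.length : Nat) : Int)) = t := by
      apply String.toList_inj.mp
      rw [PySem.Str.toList_slice]
      have : PySem.Chars.slice name.toList (some (s.length : Int)) (some ((s.length + t.toList.length : Nat) : Int))
          = List.take (s.length + t.toList.length - s.length) (List.drop s.length name.toList) :=
        PySem.List.slice_natCast _ _ _
      rw [this]
      rw [← hsu, List.append_assoc, List.drop_left]
      simp
    rw [this]; exact ht

set_option maxHeartbeats 1000000 in
theorem main_case (nm : String) (skill_set : List String)
    (hc : nm ∉ skill_set.map norm_skill_py) (hlen : ¬ PySem.Str.len nm ≤ 2) :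
    skill_loop_py nm skill_set =
      (if (PySem.List.pyRange 0 (PySem.Str.len nm) 1).any (fun i =>
            (PySem.List.pyRange (i + 3) (PySem.Str.len nm + 1) 1).any (fun j =>
              PySem.Set.contains (PySem.Set.ofList (skill_set.map norm_skill_py))
                (PySem.Str.slice nm (some i) (some j)))) = true
       then true
       else (PySem.Set.ofList (skill_set.map norm_skill_py)).any (fun s_norm =>
              decide (2 < PySem.Str.len s_norm) && PySem.Str.isIn nm s_norm)) := by
  have hrw : ∀ (b c : Bool), (if b = true then true else c) = (b || c) := by
    intro b c; cases b <;> simp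
  rw [hrw, skill_loop_eq_any, any_ofList]
  rw [PySem.Str.len_eq] at hlen
  rw [Bool.eq_iff_iff, Bool.or_eq_true, sub_scan_iff]
  simp only [List.any_eq_true, List.mem_map, Bool.or_eq_true, Bool.and_eq_true,
    decide_eq_true_eq, beq_iff_eq, PySem.Str.isIn_iff_infix, PySem.Str.len_eq]
  constructor
  · rintro ⟨x, hx, heq | ⟨⟨_, hx3⟩, hsub | hsub⟩⟩
    · exact absurd (List.mem_map.2 ⟨x, hx, heq.symm⟩) hc
    · right; exact ⟨norm_skill_py x, ⟨x, hx, rfl⟩, by exact_mod_cast hx3, hsub⟩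
    · left; exact ⟨norm_skill_py x, ⟨x, hx, rfl⟩, by exact_mod_cast hx3, hsub⟩
  · rintro (⟨t, ⟨x, hx, rfl⟩, h3, hinf⟩ | ⟨t, ⟨x, hx, rfl⟩, h3, hinf⟩)
    · exact ⟨x, hx, Or.inr ⟨⟨by exact_mod_cast (show (2:Int) < nm.toList.length by omega), by exact_mod_cast h3⟩, Or.inr hinf⟩⟩
    · exact ⟨x, hx, Or.inr ⟨⟨by exact_mod_cast (show (2:Int) < nm.toList.length by omega), h3⟩, Or.inl hinf⟩⟩

-- ===== VERDICT (by name: the statement is the Claim_ definition above) =====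
set_option maxHeartbeats 1000000 in
theorem skill_in_set_py_spec : Claim_equal_skill_in_set_py := by
  intro skill_name skill_set _
  unfold Spec_skill_in_set_py skill_in_set_py skill_in_set_py_alt
  by_cases he : skill_set = []
  · subst he
    rw [if_pos (show (([] : List String) == []) = true from rfl),
        if_pos (show (([] : List String) == []) = true from rfl)]
  · have he' : ¬ ((skill_set == []) = true) := fun h => he (beq_iff_eq.mp h)
    rw [if_neg he', if_neg he']
    set nm := norm_skill_py skill_name with hnm
    by_cases hnn : nm = ""
    · rw [if_pos (beq_iff_eq.mpr hnn), if_pos (beq_iff_eq.mpr hnn)]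
    · have hnn' : ¬ ((nm == "") = true) := fun h => hnn (beq_iff_eq.mp h)
      rw [if_neg hnn', if_neg hnn']
      by_cases hc : nm ∈ skill_set.map norm_skill_py
      · rw [if_pos ((contains_ofList_iff _ _).2 hc)]
        rw [skill_loop_eq_any, List.any_eq_true]
        obtain ⟨x, hx, hxe⟩ := List.mem_map.1 hc
        refine ⟨x, hx, ?_⟩
        rw [show (nm == norm_skill_py x) = true from beq_iff_eq.2 hxe.symm]
        rfl
      · rw [if_neg (fun h => hc ((contains_ofList_iff _ _).1 h))]
        by_cases hlen : PySem.Str.len nm ≤ 2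
        · rw [if_pos hlen]
          rw [skill_loop_eq_any, List.any_eq_false]
          intro x hx
          have h1 : (nm == norm_skill_py x) = false :=
            beq_eq_false_iff_ne.2 (fun h => hc (List.mem_map.2 ⟨x, hx, h.symm⟩))
          rw [h1, decide_eq_false (by omega : ¬ (2 < PySem.Str.len nm))]
          simp only [Bool.false_and, Bool.false_or, Bool.false_eq_true, not_false_eq_true]
        · rw [if_neg hlen]
          exact main_case nm skill_set hc hlen
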